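-- pv_equiv track=rewrite | github.com/hebbihebb/MayaBook | get_transcript.py | get_specific_content
-- ===== SOURCE A (Python) =====
-- def get_specific_content(chapters):
--     """
--     Extracts text from end of Chapter 3 and start of Chapter 4.
--     Ensures at least ~150 words per section for rigorous testing.
--     """
--     if len(chapters) < 5:
--         raise ValueError("EPUB must have at least 5 chapters for this test.")
--
--     # Chapter 3: End (target ~150 words)
--     ch3_title, ch3_text = chapters[3]
--     paras = [p for p in ch3_text.split('\n\n') if p.strip()]
--     selected_paras = []
--     word_count = 0
--     for p in reversed(paras):
--         selected_paras.insert(0, p)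
--         word_count += len(p.split())
--         if word_count >= 150:
--             break
--     ch3_selected = "\n\n".join(selected_paras)
--
--     # Chapter 4: Start (target ~150 words)
--     ch4_title, ch4_text = chapters[4]
--     paras = [p for p in ch4_text.split('\n\n') if p.strip()]
--     selected_paras = []
--     word_count = 0
--     for p in paras:
--         selected_paras.append(p)
--         word_count += len(p.split())
--         if word_count >= 150:
--             break
--     ch4_selected = "\n\n".join(selected_paras)
--
--     return [
--         {"title": ch3_title, "text": ch3_selected, "id": "ch3"},
--         {"title": ch4_title, "text": ch4_selected, "id": "ch4"}
--     ]
-- ===== SOURCE B (Python) =====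
-- def get_specific_content(chapters):
--     if len(chapters) < 5:
--         raise ValueError("EPUB must have at least 5 chapters for this test.")
--
--     def section(text, from_end):
--         paras = [p for p in text.split('\n\n') if p.strip()]
--         counts = [len(p.split()) for p in paras]
--         if from_end:
--             counts = counts[::-1]
--         sums = []
--         total = 0
--         for c in counts:
--             total += c
--             sums.append(total)
--         cut = next((i + 1 for i, s in enumerate(sums) if s >= 150), len(sums))
--         kept = paras[len(paras) - cut:] if from_end else paras[:cut]
--         return "\n\n".join(kept)
--
--     ch3_title, ch3_text = chapters[3]
--     ch4_title, ch4_text = chapters[4]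
--     return [
--         {"title": ch3_title, "text": section(ch3_text, True), "id": "ch3"},
--         {"title": ch4_title, "text": section(ch4_text, False), "id": "ch4"},
--     ]
-- ===== Notes on version B (the rewrite author's own statement) =====
-- stated objective: alternative
-- what changed: Replaces A's two accumulate-and-break loops (one over reversed paragraphs with insert(0,..), one forward with append) by a shared direction-parameterised helper that builds a word-count table with prefix sums, finds the first index whose cumulative total reaches 150, and slices the paragraph list (suffix for ch3, prefix for ch4).
import Mathlib
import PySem

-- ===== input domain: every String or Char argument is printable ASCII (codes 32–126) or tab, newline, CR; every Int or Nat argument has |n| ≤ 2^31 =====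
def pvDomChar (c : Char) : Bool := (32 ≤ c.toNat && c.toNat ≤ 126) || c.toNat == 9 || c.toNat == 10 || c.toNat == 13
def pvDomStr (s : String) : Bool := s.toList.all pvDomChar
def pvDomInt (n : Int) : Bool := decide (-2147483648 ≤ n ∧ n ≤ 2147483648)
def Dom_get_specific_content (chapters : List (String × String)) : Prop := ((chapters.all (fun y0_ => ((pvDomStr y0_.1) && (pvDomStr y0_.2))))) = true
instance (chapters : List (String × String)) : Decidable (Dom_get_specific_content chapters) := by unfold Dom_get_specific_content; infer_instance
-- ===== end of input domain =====

-- B replaces A's two accumulate-and-break loops by a word-count table with prefix sums and a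
-- slice at the first index reaching 150 (alternative decomposition, same cost).

-- ===== PORT A =====
-- ch3 loop: iterate over reversed paras, insert at front, break once word_count ≥ 150
def pvLoopA3 (l : List String) (sel : List String) (wc : Nat) : List String :=
  match l with
  | [] => sel
  | p :: rest =>
    let sel := p :: sel
    let wc := wc + (PySem.Str.split₀ p).length
    if 150 ≤ wc then sel else pvLoopA3 rest sel wc

-- ch4 loop: iterate forward, append, break once word_count ≥ 150
def pvLoopA4 (l : List String) (sel : List String) (wc : Nat) : List String :=
  match l with
  | [] => sel
  | p :: rest =>
    let sel := sel ++ [p]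
    let wc := wc + (PySem.Str.split₀ p).length
    if 150 ≤ wc then sel else pvLoopA4 rest sel wc

def get_specific_content (chapters : List (String × String)) : List (List (String × String)) :=
  if chapters.length < 5 then []   -- A raises ValueError here; excluded by Pre_
  else
    match PySem.List.pyGet? chapters 3, PySem.List.pyGet? chapters 4 with
    | some (ch3_title, ch3_text), some (ch4_title, ch4_text) =>
      let paras3 := ((PySem.Str.split? ch3_text "\n\n").getD []).filter (fun p => PySem.Str.strip p != "")
      let ch3_selected := PySem.Str.join "\n\n" (pvLoopA3 paras3.reverse [] 0)
      let paras4 := ((PySem.Str.split? ch4_text "\n\n").getD []).filter (fun p => PySem.Str.strip p != "")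
      let ch4_selected := PySem.Str.join "\n\n" (pvLoopA4 paras4 [] 0)
      [ [("title", ch3_title), ("text", ch3_selected), ("id", "ch3")],
        [("title", ch4_title), ("text", ch4_selected), ("id", "ch4")] ]
    | _, _ => []   -- unreachable when 5 ≤ length

-- ===== PORT B =====
-- running-total loop building the prefix-sum list
def pvPrefixSums (counts : List Nat) : List Nat :=
  (counts.foldl (fun (acc : List Nat × Nat) c => (acc.1 ++ [acc.2 + c], acc.2 + c)) ([], 0)).1

def pvSectionB (text : String) (fromEnd : Bool) : String :=
  let paras := ((PySem.Str.split? text "\n\n").getD []).filter (fun p => PySem.Str.strip p != "")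
  let counts := paras.map (fun p => (PySem.Str.split₀ p).length)
  let counts := if fromEnd then counts.reverse else counts
  let sums := pvPrefixSums counts
  let cut := ((sums.findIdx? (fun s => decide (150 ≤ s))).map (· + 1)).getD sums.length
  let kept := if fromEnd then paras.drop (paras.length - cut) else paras.take cut
  PySem.Str.join "\n\n" kept

def get_specific_content_alt (chapters : List (String × String)) : List (List (String × String)) :=
  if chapters.length < 5 then []   -- B raises ValueError here; excluded by Pre_
  else
    match PySem.List.pyGet? chapters 3 with
    | none => []
    | some ch3 =>
      match PySem.List.pyGet? chapters 4 with
      | none => []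
      | some ch4 =>
        [ [("title", ch3.1), ("text", pvSectionB ch3.2 true), ("id", "ch3")],
          [("title", ch4.1), ("text", pvSectionB ch4.2 false), ("id", "ch4")] ]

-- ===== PRECONDITION & SPEC =====
-- A raises ValueError when len(chapters) < 5; those inputs are excluded.
def Pre_get_specific_content (chapters : List (String × String)) : Prop := 5 ≤ chapters.length
instance (chapters : List (String × String)) : Decidable (Pre_get_specific_content chapters) := by unfold Pre_get_specific_content; infer_instance
def pvWitness_get_specific_content : (List (String × String)) :=
  [("a","x"), ("b","y"), ("c","z"), ("t3","p q"), ("t4","r s")]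
def Spec_get_specific_content (chapters : List (String × String)) (out : List (List (String × String))) : Prop := out = get_specific_content_alt chapters
instance (chapters : List (String × String)) (out : List (List (String × String))) : Decidable (Spec_get_specific_content chapters out) := by unfold Spec_get_specific_content; infer_instance

-- ===== CLAIM (what is proved, stated in full; the proofs are below) =====
def Claim_equal_get_specific_content : Prop := ∀ (chapters : List (String × String)), Dom_get_specific_content chapters → Pre_get_specific_content chapters → Spec_get_specific_content chapters (get_specific_content chapters)

-- ===== LEMMAS AND PROOFS =====

-- recursive characterisation of the cutoff index
def pvCutRec (t : Nat) : List Nat → Nat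
  | [] => 0
  | c :: rest => if 150 ≤ t + c then 1 else 1 + pvCutRec (t + c) rest

theorem pvCutRec_le (t : Nat) (l : List Nat) : pvCutRec t l ≤ l.length := by
  induction l generalizing t with
  | nil => simp [pvCutRec]
  | cons c rest ih =>
    simp only [pvCutRec, List.length_cons]
    split
    · omega
    · have := ih (t + c); omega

theorem pvLoopA4_eq (l sel : List String) (wc : Nat) :
    pvLoopA4 l sel wc = sel ++ l.take (pvCutRec wc (l.map (fun p => (PySem.Str.split₀ p).length))) := by
  induction l generalizing sel wc with
  | nil => simp [pvLoopA4, pvCutRec]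
  | cons p rest ih =>
    simp only [pvLoopA4, List.map_cons, pvCutRec]
    split
    · simp
    · rw [ih, Nat.add_comm 1]; simp [List.take_succ_cons]

theorem pvLoopA3_eq (l sel : List String) (wc : Nat) :
    pvLoopA3 l sel wc = (l.take (pvCutRec wc (l.map (fun p => (PySem.Str.split₀ p).length)))).reverse ++ sel := by
  induction l generalizing sel wc with
  | nil => simp [pvLoopA3, pvCutRec]
  | cons p rest ih =>
    simp only [pvLoopA3, List.map_cons, pvCutRec]
    split
    · simp
    · rw [ih, Nat.add_comm 1]; simp [List.take_succ_cons]

-- the prefix-sum loop from an arbitrary running total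
def pvScanSums (t : Nat) : List Nat → List Nat
  | [] => []
  | c :: rest => (t + c) :: pvScanSums (t + c) rest

theorem pvPrefixSums_go (counts : List Nat) (acc : List Nat) (t : Nat) :
    (counts.foldl (fun (acc : List Nat × Nat) c => (acc.1 ++ [acc.2 + c], acc.2 + c)) (acc, t)).1
      = acc ++ pvScanSums t counts := by
  induction counts generalizing acc t with
  | nil => simp [pvScanSums]
  | cons c rest ih => simp [List.foldl_cons, ih, pvScanSums]

theorem pvScanSums_length (t : Nat) (l : List Nat) : (pvScanSums t l).length = l.length := by
  induction l generalizing t with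
  | nil => rfl
  | cons c rest ih => simp [pvScanSums, ih]

theorem pvCut_eq (t : Nat) (counts : List Nat) :
    ((((pvScanSums t counts).findIdx? (fun s => decide (150 ≤ s))).map (· + 1)).getD (pvScanSums t counts).length)
      = pvCutRec t counts := by
  induction counts generalizing t with
  | nil => simp [pvScanSums, pvCutRec]
  | cons c rest ih =>
    simp only [pvScanSums, pvCutRec, List.findIdx?_cons]
    by_cases h : 150 ≤ t + c
    · simp [h]
    · simp only [h, decide_false, if_false, List.length_cons]
      rw [← ih (t + c)]
      cases hfi : (pvScanSums (t + c) rest).findIdx? (fun s => decide (150 ≤ s)) with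
      | none => simp [pvScanSums_length, Nat.add_comm]
      | some i => simp [Nat.add_comm]

theorem pvSectionB_true (text : String) :
    pvSectionB text true
      = PySem.Str.join "\n\n" (pvLoopA3 (((PySem.Str.split? text "\n\n").getD []).filter (fun p => PySem.Str.strip p != "")).reverse [] 0) := by
  unfold pvSectionB
  simp only [if_true]
  rw [pvLoopA3_eq]
  set paras := ((PySem.Str.split? text "\n\n").getD []).filter (fun p => PySem.Str.strip p != "") with hp
  rw [pvPrefixSums, pvPrefixSums_go, List.nil_append, ← List.map_reverse, pvCut_eq]
  congr 1
  rw [List.append_nil]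
  have hle : pvCutRec 0 (paras.reverse.map (fun p => (PySem.Str.split₀ p).length)) ≤ paras.length := by
    have := pvCutRec_le 0 (paras.reverse.map (fun p => (PySem.Str.split₀ p).length))
    simpa using this
  rw [List.take_reverse, List.reverse_reverse]

theorem pvSectionB_false (text : String) :
    pvSectionB text false
      = PySem.Str.join "\n\n" (pvLoopA4 (((PySem.Str.split? text "\n\n").getD []).filter (fun p => PySem.Str.strip p != "")) [] 0) := by
  unfold pvSectionB
  simp only [Bool.false_eq_true, if_false]
  rw [pvLoopA4_eq, List.nil_append]
  rw [pvPrefixSums, pvPrefixSums_go, List.nil_append, pvCut_eq]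

-- ===== VERDICT (by name: the statement is the Claim_ definition above) =====
theorem get_specific_content_spec : Claim_equal_get_specific_content := by
  intro chapters _ hpre
  unfold Spec_get_specific_content get_specific_content get_specific_content_alt
  have h5 : ¬ chapters.length < 5 := by
    unfold Pre_get_specific_content at hpre; omega
  simp only [h5, if_false]
  cases h3 : PySem.List.pyGet? chapters 3 with
  | none => rfl
  | some v3 =>
    cases h4 : PySem.List.pyGet? chapters 4 with
    | none => rfl
    | some v4 =>
      obtain ⟨t3, x3⟩ := v3
      obtain ⟨t4, x4⟩ := v4
      simp only [pvSectionB_true, pvSectionB_false]
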